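-- pv_equiv track=rewrite | github.com/michaelu123/adfc2 | venv/src/adfc_rest1.py | getZusatzInfo
-- ===== SOURCE A (Python) =====
-- def getZusatzInfo(itemTags):
--     besonders = []
--     weitere = []
--     zielgruppe = []
--     for itemTag in itemTags:
--         tag = itemTag.get("tag")
--         category = itemTag.get("category")
--         if category == "Besondere Charakteristik /Thema":
--             besonders.append(tag)
--         if category == "Weitere Eigenschaften":
--             weitere.append(tag)
--         if category == "Besondere Zielgruppe":
--             zielgruppe.append(tag)
--     if len(besonders) > 0:
--         besonders = "Besondere Charakteristik/Thema: " + ", ".join(besonders)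
--     else:
--         besonders = ""
--     if len(weitere) > 0:
--         weitere = "Weitere Eigenschaften: " + ", ".join(weitere)
--     else:
--         weitere = ""
--     if len(zielgruppe) > 0:
--         zielgruppe = "Besondere Zielgruppe: " + ", ".join(zielgruppe)
--     else:
--         zielgruppe = ""
--     return [besonders, weitere, zielgruppe]
-- ===== SOURCE B (Python) =====
-- _CATS = [
--     ("Besondere Charakteristik /Thema", "Besondere Charakteristik/Thema: "),
--     ("Weitere Eigenschaften", "Weitere Eigenschaften: "),
--     ("Besondere Zielgruppe", "Besondere Zielgruppe: "),
-- ]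
--
--
-- def _fmt(itemTags, cat, prefix):
--     tags = [it.get("tag") for it in itemTags if it.get("category") == cat]
--     return prefix + ", ".join(tags) if tags else ""
--
--
-- def getZusatzInfo(itemTags):
--     return [_fmt(itemTags, cat, prefix) for cat, prefix in _CATS]
-- ===== Notes on version B (the rewrite author's own statement) =====
-- stated objective: simpler
-- what changed: A's single pass with three parallel accumulator lists and three copies of the format-or-empty branch is replaced by one table of (category, prefix) pairs and one generic filter-and-format helper applied to each table row.
import Mathlib
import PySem

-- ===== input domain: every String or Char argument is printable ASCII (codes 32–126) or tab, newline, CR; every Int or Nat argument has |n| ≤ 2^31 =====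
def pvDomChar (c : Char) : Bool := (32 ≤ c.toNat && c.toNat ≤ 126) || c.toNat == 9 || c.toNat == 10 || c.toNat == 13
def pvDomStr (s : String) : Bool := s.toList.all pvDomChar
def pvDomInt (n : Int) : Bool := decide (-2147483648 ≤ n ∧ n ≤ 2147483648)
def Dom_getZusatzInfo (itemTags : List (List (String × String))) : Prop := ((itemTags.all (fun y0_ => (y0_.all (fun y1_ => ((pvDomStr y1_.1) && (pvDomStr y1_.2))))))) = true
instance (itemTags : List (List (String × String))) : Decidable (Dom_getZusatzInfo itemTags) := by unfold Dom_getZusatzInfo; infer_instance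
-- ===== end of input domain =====

-- B replaces A's three parallel accumulators and triplicated format-or-empty branches by a
-- (category, prefix) table with one generic filter-and-format helper (objective: simpler).

-- dict.get(k) on a dict given as an association list: first match, none if absent (exact)
def pvGetKey? (d : List (String × String)) (k : String) : Option String :=
  (d.find? (fun p => p.1 == k)).map (·.2)

-- ", ".join over the collected tags; the collected elements are Option String (dict.get may
-- give None); exact when every element is some — Pre_getZusatzInfo guarantees that (Python
-- raises TypeError otherwise).
def pvJoinTags (ts : List (Option String)) : String :=
  PySem.Str.join ", " (ts.map (fun t => t.getD ""))

-- ===== PORT A =====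
def getZusatzInfo (itemTags : List (List (String × String))) : List String :=
  let st := itemTags.foldl
    (fun (st : List (Option String) × List (Option String) × List (Option String)) itemTag =>
      let tag := pvGetKey? itemTag "tag"
      let category := pvGetKey? itemTag "category"
      let st := if category == some "Besondere Charakteristik /Thema" then (st.1 ++ [tag], st.2.1, st.2.2) else st
      let st := if category == some "Weitere Eigenschaften" then (st.1, st.2.1 ++ [tag], st.2.2) else st
      let st := if category == some "Besondere Zielgruppe" then (st.1, st.2.1, st.2.2 ++ [tag]) else st
      st) ([], [], [])
  let besonders := if st.1.length > 0 then "Besondere Charakteristik/Thema: " ++ pvJoinTags st.1 else ""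
  let weitere := if st.2.1.length > 0 then "Weitere Eigenschaften: " ++ pvJoinTags st.2.1 else ""
  let zielgruppe := if st.2.2.length > 0 then "Besondere Zielgruppe: " ++ pvJoinTags st.2.2 else ""
  [besonders, weitere, zielgruppe]

-- ===== PORT B =====
def pvCats : List (String × String) :=
  [("Besondere Charakteristik /Thema", "Besondere Charakteristik/Thema: "),
   ("Weitere Eigenschaften", "Weitere Eigenschaften: "),
   ("Besondere Zielgruppe", "Besondere Zielgruppe: ")]

def pvFmt (itemTags : List (List (String × String))) (cat prefix_ : String) : String :=
  let tags := (itemTags.filter (fun it => pvGetKey? it "category" == some cat)).map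
                (fun it => pvGetKey? it "tag")
  if tags.isEmpty then "" else prefix_ ++ pvJoinTags tags

def getZusatzInfo_alt (itemTags : List (List (String × String))) : List String :=
  pvCats.map (fun cp => pvFmt itemTags cp.1 cp.2)

-- ===== PRECONDITION & SPEC =====
-- Pre_ excludes exactly the inputs on which Python A raises TypeError: an itemTag whose
-- category is one of the three collected ones but which has no "tag" key (", ".join(None …)).
def Pre_getZusatzInfo (itemTags : List (List (String × String))) : Prop :=
  ∀ it ∈ itemTags,
    (pvGetKey? it "category" = some "Besondere Charakteristik /Thema" ∨
     pvGetKey? it "category" = some "Weitere Eigenschaften" ∨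
     pvGetKey? it "category" = some "Besondere Zielgruppe") →
    (pvGetKey? it "tag").isSome
instance (itemTags : List (List (String × String))) : Decidable (Pre_getZusatzInfo itemTags) := by
  unfold Pre_getZusatzInfo; infer_instance

def pvWitness_getZusatzInfo : (List (List (String × String))) :=
  [[("tag", "Radtour"), ("category", "Weitere Eigenschaften")], [("category", "anderes")]]

def Spec_getZusatzInfo (itemTags : List (List (String × String))) (out : List String) : Prop := out = getZusatzInfo_alt itemTags
instance (itemTags : List (List (String × String))) (out : List String) : Decidable (Spec_getZusatzInfo itemTags out) := by unfold Spec_getZusatzInfo; infer_instance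

-- ===== CLAIM (what is proved, stated in full; the proofs are below) =====
def Claim_equal_getZusatzInfo : Prop := ∀ (itemTags : List (List (String × String))), Dom_getZusatzInfo itemTags → Pre_getZusatzInfo itemTags → Spec_getZusatzInfo itemTags (getZusatzInfo itemTags)

-- ===== LEMMAS AND PROOFS =====

-- the tags B collects for category c
def pvSel (c : String) (l : List (List (String × String))) : List (Option String) :=
  (l.filter (fun it => pvGetKey? it "category" == some c)).map (fun it => pvGetKey? it "tag")

-- A's loop, started from any state, appends exactly B's three filtered tag lists
theorem pvLoop_eq (l : List (List (String × String))) :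
    ∀ b w z : List (Option String),
    l.foldl
      (fun (st : List (Option String) × List (Option String) × List (Option String)) itemTag =>
        let tag := pvGetKey? itemTag "tag"
        let category := pvGetKey? itemTag "category"
        let st := if category == some "Besondere Charakteristik /Thema" then (st.1 ++ [tag], st.2.1, st.2.2) else st
        let st := if category == some "Weitere Eigenschaften" then (st.1, st.2.1 ++ [tag], st.2.2) else st
        let st := if category == some "Besondere Zielgruppe" then (st.1, st.2.1, st.2.2 ++ [tag]) else st
        st) (b, w, z)
    = (b ++ pvSel "Besondere Charakteristik /Thema" l,
       w ++ pvSel "Weitere Eigenschaften" l,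
       z ++ pvSel "Besondere Zielgruppe" l) := by
  induction l with
  | nil => intro b w z; simp [pvSel]
  | cons it rest ih =>
    intro b w z
    simp only [List.foldl_cons]
    by_cases h1 : pvGetKey? it "category" = some "Besondere Charakteristik /Thema" <;>
    by_cases h2 : pvGetKey? it "category" = some "Weitere Eigenschaften" <;>
    by_cases h3 : pvGetKey? it "category" = some "Besondere Zielgruppe" <;>
    simp_all [pvSel]

theorem pvFmt_eq (l : List (List (String × String))) (c p : String) :
    (if (pvSel c l).length > 0 then p ++ pvJoinTags (pvSel c l) else "") = pvFmt l c p := by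
  show _ = (if (pvSel c l).isEmpty then "" else p ++ pvJoinTags (pvSel c l))
  rcases pvSel c l with _ | ⟨t, ts⟩ <;> simp

theorem getZusatzInfo_eq_alt (itemTags : List (List (String × String))) :
    getZusatzInfo itemTags = getZusatzInfo_alt itemTags := by
  unfold getZusatzInfo getZusatzInfo_alt pvCats
  rw [pvLoop_eq]
  simp only [List.nil_append, List.map_cons, List.map_nil]
  rw [pvFmt_eq, pvFmt_eq, pvFmt_eq]

-- ===== VERDICT (by name: the statement is the Claim_ definition above) =====
theorem getZusatzInfo_spec : Claim_equal_getZusatzInfo := by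
  intro itemTags _ _
  unfold Spec_getZusatzInfo
  exact getZusatzInfo_eq_alt itemTags
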